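-- pv_equiv track=rewrite | github.com/saikumaresh/LearnByCoding | Data_Structures/Heaps_and_Priority_Queues/Magician_and_Chocolates.py | maxChocolates
-- ===== SOURCE A (Python) =====
-- def maxChocolates(A, B):
--     import heapq
--
--     # Create a max heap (using negative values for the heapq)
--     max_heap = [-b for b in B]
--     heapq.heapify(max_heap)
--
--     total_chocolates = 0
--     MOD = 10**9 + 7
--
--     for _ in range(A):
--         # Get the bag with the maximum chocolates
--         max_chocolates = -heapq.heappop(max_heap)
--         total_chocolates = (total_chocolates + max_chocolates) % MOD
--
--         # Refill the bag with floor(max_chocolates / 2)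
--         heapq.heappush(max_heap, -(max_chocolates // 2))
--
--     return total_chocolates
-- ===== SOURCE B (Python) =====
-- import bisect
--
-- def maxChocolates(A, B):
--     bags = sorted(B)
--     total = 0
--     MOD = 10**9 + 7
--
--     for _ in range(A):
--         m = bags.pop()                 # largest remaining bag
--         total = (total + m) % MOD
--         bisect.insort(bags, m // 2)    # put back the half-refilled bag
--
--     return total
-- ===== Notes on version B (the rewrite author's own statement) =====
-- stated objective: alternative
-- what changed: Replaces the binary max-heap (heapify + per-pick heappop/heappush of negated values) by a plain ascending sorted list maintained with bisect.insort: one initial sort, the maximum popped from the end, and each half re-inserted at its binary-search position.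
import Mathlib
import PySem

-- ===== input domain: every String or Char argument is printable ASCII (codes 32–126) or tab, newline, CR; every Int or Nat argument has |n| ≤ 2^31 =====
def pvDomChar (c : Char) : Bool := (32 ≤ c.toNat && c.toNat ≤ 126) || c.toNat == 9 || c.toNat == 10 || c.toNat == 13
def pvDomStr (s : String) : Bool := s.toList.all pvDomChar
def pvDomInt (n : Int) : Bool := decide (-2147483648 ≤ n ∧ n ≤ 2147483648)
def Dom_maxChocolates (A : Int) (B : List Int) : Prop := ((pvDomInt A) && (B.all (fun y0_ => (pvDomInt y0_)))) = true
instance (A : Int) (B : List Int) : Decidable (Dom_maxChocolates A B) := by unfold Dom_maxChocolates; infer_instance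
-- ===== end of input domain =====

-- B replaces A's binary max-heap by an ascending sorted list kept sorted with binary-search
-- insertion (bisect.insort): pop the maximum off the end, re-insert its half in place.

-- ===== PORT A =====
-- heapq.heappop returns the smallest entry; the heap is modelled by the multiset of its
-- entries (exact for Int entries: the sequence of popped VALUES depends only on the multiset).
def pvPopMin (l : List Int) : Option (Int × List Int) :=
  match PySem.List.min? l (fun y => y) with
  | none => none
  | some m => some (m, l.erase m)

def pvALoop : Nat → List Int → Int → Int
  | 0, _, t => t
  | n+1, heap, t =>
    match pvPopMin heap with
    | none => t  -- heappop of an empty heap: IndexError; excluded by Pre_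
    | some (mn, rest) =>
      -- max_chocolates = -heapq.heappop(...); heappush of -(max_chocolates // 2)
      pvALoop n ((-(PySem.Int.floordiv (-mn) 2)) :: rest)
        (PySem.Int.mod (t + (-mn)) 1000000007)

def maxChocolates (A : Int) (B : List Int) : Int :=
  pvALoop A.toNat (B.map (fun b => -b)) 0

-- ===== PORT B =====
-- bisect.insort bags x : insert x at position bisect_right(bags, x)
def pvInsort (l : List Int) (x : Int) : List Int :=
  l.take (PySem.List.bisectRight l x) ++ x :: l.drop (PySem.List.bisectRight l x)

-- the 'for _ in range(A)' loop of Source B; bags.pop() takes the last element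
def pvBLoop : Nat → List Int → Int → Int
  | 0, _, t => t
  | n+1, bags, t =>
    match bags.getLast? with
    | none => t  -- bags.pop() of an empty list: IndexError; excluded by Pre_
    | some m =>
      pvBLoop n (pvInsort bags.dropLast (PySem.Int.floordiv m 2))
        (PySem.Int.mod (t + m) 1000000007)

def maxChocolates_alt (A : Int) (B : List Int) : Int :=
  pvBLoop A.toNat (PySem.List.sorted B (fun y => y) false) 0

-- ===== PRECONDITION & SPEC =====
-- A raises IndexError (heappop of an empty heap) exactly when B is empty and A > 0.
def Pre_maxChocolates (A : Int) (B : List Int) : Prop := B = [] → A ≤ 0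
instance (A : Int) (B : List Int) : Decidable (Pre_maxChocolates A B) := by unfold Pre_maxChocolates; infer_instance
def pvWitness_maxChocolates : Int × List Int := (3, [7, 2])

def Spec_maxChocolates (A : Int) (B : List Int) (out : Int) : Prop := out = maxChocolates_alt A B
instance (A : Int) (B : List Int) (out : Int) : Decidable (Spec_maxChocolates A B out) := by unfold Spec_maxChocolates; infer_instance

-- ===== CLAIM (what is proved, stated in full; the proofs are below) =====
def Claim_equal_maxChocolates : Prop := ∀ (A : Int) (B : List Int), Dom_maxChocolates A B → Pre_maxChocolates A B → Spec_maxChocolates A B (maxChocolates A B)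

-- ===== LEMMAS AND PROOFS =====

theorem pv_max?_eq_some_iff (l : List Int) (m : Int) :
    PySem.List.max? l (fun y => y) = some m ↔ m ∈ l ∧ ∀ x ∈ l, x ≤ m := by
  constructor
  · intro h
    exact ⟨PySem.List.max?_mem h, fun x hx => PySem.List.max?_isMax h x hx⟩
  · rintro ⟨hm, hub⟩
    cases hq : PySem.List.max? l (fun y => y) with
    | none => rw [PySem.List.max?_eq_none_iff] at hq; subst hq; cases hm
    | some m' =>
      have h1 := PySem.List.max?_mem hq
      have h2 := PySem.List.max?_isMax hq
      have : m' = m := le_antisymm (hub m' h1) (h2 m hm)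
      simp [this]

theorem pv_min?_eq_some_iff (l : List Int) (m : Int) :
    PySem.List.min? l (fun y => y) = some m ↔ m ∈ l ∧ ∀ x ∈ l, m ≤ x := by
  constructor
  · intro h
    exact ⟨PySem.List.min?_mem h, fun x hx => PySem.List.min?_isMin h x hx⟩
  · rintro ⟨hm, hlb⟩
    cases hq : PySem.List.min? l (fun y => y) with
    | none => rw [PySem.List.min?_eq_none_iff] at hq; subst hq; cases hm
    | some m' =>
      have h1 := PySem.List.min?_mem hq
      have h2 := PySem.List.min?_isMin hq
      have : m' = m := le_antisymm (h2 m hm) (hlb m' h1)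
      simp [this]

-- abstract single-pop loop over the (un-negated) bag of values
def pvGLoop : Nat → List Int → Int → Int
  | 0, _, t => t
  | n+1, bag, t =>
    match PySem.List.max? bag (fun y => y) with
    | none => t
    | some m => pvGLoop n (PySem.Int.floordiv m 2 :: bag.erase m) (PySem.Int.mod (t + m) 1000000007)

theorem pvGLoop_step (n : Nat) (bag : List Int) (t m : Int)
    (hm : m ∈ bag) (hub : ∀ x ∈ bag, x ≤ m) :
    pvGLoop (n+1) bag t
      = pvGLoop n (PySem.Int.floordiv m 2 :: bag.erase m) (PySem.Int.mod (t + m) 1000000007) := by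
  have h := (pv_max?_eq_some_iff bag m).mpr ⟨hm, hub⟩
  simp [pvGLoop, h]

theorem pvALoop_eq_gLoop (n : Nat) : ∀ (bag : List Int) (t : Int),
    pvALoop n (bag.map (fun b => -b)) t = pvGLoop n bag t := by
  induction n with
  | zero => intro bag t; rfl
  | succ n IH =>
    intro bag t
    cases hq : PySem.List.max? bag (fun y => y) with
    | none =>
      rw [PySem.List.max?_eq_none_iff] at hq; subst hq
      simp [pvALoop, pvPopMin, pvGLoop,
        (PySem.List.min?_eq_none_iff ([] : List Int) (fun y => y)).mpr rfl,
        (PySem.List.max?_eq_none_iff ([] : List Int) (fun y => y)).mpr rfl]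
    | some m =>
      have hm := PySem.List.max?_mem hq
      have hub := PySem.List.max?_isMax hq
      have hmin : PySem.List.min? (bag.map (fun b => -b)) (fun y => y) = some (-m) := by
        rw [pv_min?_eq_some_iff]
        constructor
        · exact List.mem_map.mpr ⟨m, hm, rfl⟩
        · intro x hx
          rcases List.mem_map.mp hx with ⟨y, hy, rfl⟩
          have := hub y hy
          omega
      have herase : (bag.map (fun b => -b)).erase (-m)
          = (bag.erase m).map (fun b => -b) := by
        have hinj : Function.Injective (fun b : Int => -b) := fun a b h => by
          simpa using congrArg Neg.neg h
        simpa using (List.map_erase hinj bag).symm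
      rw [pvGLoop_step n bag t m hm hub]
      show pvALoop (n+1) (bag.map (fun b => -b)) t = _
      rw [pvALoop]
      simp only [pvPopMin, hmin]
      rw [herase, neg_neg]
      have : (-(PySem.Int.floordiv m 2)) :: (bag.erase m).map (fun b => -b)
          = (PySem.Int.floordiv m 2 :: bag.erase m).map (fun b => -b) := by simp
      rw [this, IH]

theorem pvGLoop_congr (n : Nat) : ∀ (b1 b2 : List Int) (t : Int), b1.Perm b2 →
    pvGLoop n b1 t = pvGLoop n b2 t := by
  induction n with
  | zero => intro b1 b2 t _; rfl
  | succ n IH =>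
    intro b1 b2 t hperm
    cases hq : PySem.List.max? b1 (fun y => y) with
    | none =>
      rw [PySem.List.max?_eq_none_iff] at hq; subst hq
      have : b2 = [] := hperm.symm.eq_nil
      subst this; rfl
    | some m =>
      have hm := PySem.List.max?_mem hq
      have hub := PySem.List.max?_isMax hq
      have hm2 : m ∈ b2 := hperm.mem_iff.mp hm
      have hub2 : ∀ x ∈ b2, x ≤ m := fun x hx => hub x (hperm.mem_iff.mpr hx)
      rw [pvGLoop_step n b1 t m hm hub, pvGLoop_step n b2 t m hm2 hub2]
      exact IH _ _ _ ((hperm.erase m).cons _)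

theorem pvInsort_perm (l : List Int) (x : Int) : (pvInsort l x).Perm (x :: l) := by
  unfold pvInsort
  calc (l.take (PySem.List.bisectRight l x) ++ x :: l.drop (PySem.List.bisectRight l x)).Perm
        (x :: (l.take (PySem.List.bisectRight l x) ++ l.drop (PySem.List.bisectRight l x))) :=
        List.perm_middle
    _ = x :: l := by rw [List.take_append_drop]

theorem pvInsort_sorted (l : List Int) (x : Int) (h : l.Pairwise (· ≤ ·)) :
    (pvInsort l x).Pairwise (· ≤ ·) := by
  obtain ⟨hle, hbefore, hafter⟩ := PySem.List.bisectRight_spec l x h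
  unfold pvInsort
  set i := PySem.List.bisectRight l x with hi
  have htake : ∀ a ∈ l.take i, a ≤ x := by
    intro a ha
    rcases List.mem_iff_getElem.mp ha with ⟨j, hj, rfl⟩
    have hj' : j < l.length := lt_of_lt_of_le (lt_of_lt_of_le hj (by simp [List.length_take])) le_rfl
    rw [List.getElem_take]
    exact hbefore j hj' (lt_of_lt_of_le hj (by simp [List.length_take]))
  have hdrop : ∀ b ∈ l.drop i, x ≤ b := by
    intro b hb
    rcases List.mem_iff_getElem.mp hb with ⟨k, hk, rfl⟩
    rw [List.getElem_drop]
    have hk' : i + k < l.length := by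
      have := hk; simp [List.length_drop] at this; omega
    exact le_of_lt (hafter (i + k) hk' (Nat.le_add_right i k))
  rw [List.pairwise_append]
  refine ⟨h.sublist (List.take_sublist i l), ?_, ?_⟩
  · rw [List.pairwise_cons]
    exact ⟨hdrop, h.sublist (List.drop_sublist i l)⟩
  · intro a ha b hb
    rcases List.mem_cons.mp hb with rfl | hb
    · exact htake a ha
    · exact le_trans (htake a ha) (hdrop b hb)

theorem pvBLoop_eq_gLoop (n : Nat) : ∀ (bags : List Int) (t : Int),
    bags.Pairwise (· ≤ ·) → pvBLoop n bags t = pvGLoop n bags t := by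
  induction n with
  | zero => intro bags t _; rfl
  | succ n IH =>
    intro bags t hsorted
    cases hlast : bags.getLast? with
    | none =>
      have : bags = [] := List.getLast?_eq_none_iff.mp hlast
      subst this
      simp [pvBLoop, pvGLoop,
        (PySem.List.max?_eq_none_iff ([] : List Int) (fun y => y)).mpr rfl]
    | some m =>
      have hne : bags ≠ [] := by intro h; subst h; simp at hlast
      have hlastv : bags.getLast hne = m := by
        rw [List.getLast?_eq_some_getLast hne] at hlast
        exact Option.some_inj.mp hlast
      have hsplit : bags.dropLast ++ [m] = bags := by
        rw [← hlastv]; exact List.dropLast_append_getLast hne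
      have hm : m ∈ bags := by rw [← hsplit]; simp
      have hub : ∀ x ∈ bags, x ≤ m := by
        intro x hx
        rw [← hsplit] at hsorted hx
        rcases List.mem_append.mp hx with hx | hx
        · exact (List.pairwise_append.mp hsorted).2.2 x hx m (List.mem_singleton_self m)
        · rw [List.mem_singleton.mp hx]
      have hperm : (pvInsort bags.dropLast (PySem.Int.floordiv m 2)).Perm
          (PySem.Int.floordiv m 2 :: bags.erase m) := by
        refine (pvInsort_perm _ _).trans (List.Perm.cons _ ?_)
        -- dropLast ~ erase m : both remove one occurrence of the value m
        have hcount : ∀ w : Int, bags.dropLast.count w = (bags.erase m).count w := by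
          intro w
          have h1 : bags.count w = bags.dropLast.count w + (if m = w then 1 else 0) := by
            conv_lhs => rw [← hsplit]
            simp [List.count_append, List.count_singleton]
          have h2 : (bags.erase m).count w = bags.count w - (if m = w then 1 else 0) := by
            rw [List.count_erase]
            simp [beq_iff_eq]
          omega
        exact List.perm_iff_count.mpr hcount
      rw [pvGLoop_step n bags t m hm hub]
      show pvBLoop (n+1) bags t = _
      rw [pvBLoop]
      simp only [hlast]
      rw [IH _ _ (pvInsort_sorted _ _ (hsorted.sublist (List.dropLast_sublist bags)))]
      exact pvGLoop_congr n _ _ _ hperm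

-- ===== VERDICT (by name: the statement is the Claim_ definition above) =====
theorem maxChocolates_spec : Claim_equal_maxChocolates := by
  intro A B _hdom _hpre
  show maxChocolates A B = maxChocolates_alt A B
  unfold maxChocolates maxChocolates_alt
  rw [pvALoop_eq_gLoop,
    pvBLoop_eq_gLoop A.toNat _ 0 (PySem.List.sorted_pairwise B (fun y => y)),
    pvGLoop_congr A.toNat B (PySem.List.sorted B (fun y => y) false) 0
      (PySem.List.sorted_perm B (fun y => y) false).symm]
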